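-- pv_equiv track=rewrite | github.com/Red-dino/small-projects | evolved_houses/home.py | pyramid_roof
-- ===== SOURCE A (Python) =====
-- def pyramid_roof(height=5):
--     house = []
--     for y in range(5):
--         x_dim = []
--         for x in range(10):
--             z_dim = []
--             for z in range(10):
--                 # y2 = 4 - y
--                 y2 = y
--                 z_dim.append(y2 < height and x >= 0 + y2 and x <= 9 - y2 and z >= 0 + y2 and z <= 9 - y2)
--             x_dim.append(z_dim)
--         house.append(x_dim)
--     return house
-- ===== SOURCE B (Python) =====
-- def pyramid_roof(height=5):
--     house = []
--     for y in range(5):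
--         if y < height:
--             w = 10 - 2 * y
--             inner = [False] * y + [True] * w + [False] * y
--             layer = ([[False] * 10 for _ in range(y)]
--                      + [list(inner) for _ in range(w)]
--                      + [[False] * 10 for _ in range(y)])
--         else:
--             layer = [[False] * 10 for _ in range(10)]
--         house.append(layer)
--     return house
-- ===== Notes on version B (the rewrite author's own statement) =====
-- stated objective: alternative
-- what changed: B builds each layer by concatenating replicated row slabs ([False]*y + [True]*w + [False]*y) instead of evaluating a five-way predicate at every cell of the fixed grid.
import Mathlib
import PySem

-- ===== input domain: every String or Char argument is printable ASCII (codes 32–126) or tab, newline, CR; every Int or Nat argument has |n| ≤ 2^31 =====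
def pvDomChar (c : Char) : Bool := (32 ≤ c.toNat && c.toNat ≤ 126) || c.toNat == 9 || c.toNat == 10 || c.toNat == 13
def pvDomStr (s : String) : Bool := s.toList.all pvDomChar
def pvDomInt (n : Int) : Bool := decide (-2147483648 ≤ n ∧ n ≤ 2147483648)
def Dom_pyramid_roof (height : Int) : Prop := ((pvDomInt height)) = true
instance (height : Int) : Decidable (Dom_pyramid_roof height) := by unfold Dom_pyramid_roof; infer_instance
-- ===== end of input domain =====

-- B builds each layer from replicated row slabs instead of testing a per-cell predicate (alternative decomposition, same cost).

-- ===== PORT A =====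
def pyramid_roof (height : Int) : List (List (List Bool)) :=
  (PySem.List.pyRange 0 5 1).map (fun y =>
    (PySem.List.pyRange 0 10 1).map (fun x =>
      (PySem.List.pyRange 0 10 1).map (fun z =>
        -- y2 = y; append of the five-fold `and`
        decide (y < height) && decide (x ≥ 0 + y) && decide (x ≤ 9 - y) &&
        decide (z ≥ 0 + y) && decide (z ≤ 9 - y))))

-- ===== PORT B =====
def pyramid_roof_alt (height : Int) : List (List (List Bool)) :=
  (PySem.List.pyRange 0 5 1).map (fun y =>
    if y < height then
      let w : Int := 10 - 2 * y
      let inner : List Bool :=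
        List.replicate y.toNat false ++ List.replicate w.toNat true ++ List.replicate y.toNat false
      List.replicate y.toNat (List.replicate 10 false) ++
      List.replicate w.toNat inner ++
      List.replicate y.toNat (List.replicate 10 false)
    else
      List.replicate 10 (List.replicate 10 false))

-- ===== PRECONDITION & SPEC =====
def Spec_pyramid_roof (height : Int) (out : List (List (List Bool))) : Prop := out = pyramid_roof_alt height
instance (height : Int) (out : List (List (List Bool))) : Decidable (Spec_pyramid_roof height out) := by unfold Spec_pyramid_roof; infer_instance

-- ===== CLAIM (what is proved, stated in full; the proofs are below) =====
def Claim_equal_pyramid_roof : Prop := ∀ (height : Int), Dom_pyramid_roof height → Spec_pyramid_roof height (pyramid_roof height)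

-- ===== LEMMAS AND PROOFS =====

-- One layer of A equals one layer of B, for each of the five concrete y values.
theorem pv_layer_eq (y height : Int)
    (hy : y = 0 ∨ y = 1 ∨ y = 2 ∨ y = 3 ∨ y = 4) :
    ((PySem.List.pyRange 0 10 1).map (fun x =>
      (PySem.List.pyRange 0 10 1).map (fun z =>
        decide (y < height) && decide (x ≥ 0 + y) && decide (x ≤ 9 - y) &&
        decide (z ≥ 0 + y) && decide (z ≤ 9 - y)))) =
    (if y < height then
      let w : Int := 10 - 2 * y
      let inner : List Bool :=
        List.replicate y.toNat false ++ List.replicate w.toNat true ++ List.replicate y.toNat false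
      List.replicate y.toNat (List.replicate 10 false) ++
      List.replicate w.toNat inner ++
      List.replicate y.toNat (List.replicate 10 false)
    else
      List.replicate 10 (List.replicate 10 false)) := by
  by_cases h : y < height <;>
    rcases hy with rfl | rfl | rfl | rfl | rfl <;>
      simp only [h, if_pos, if_neg, not_false_eq_true] <;>
      simp <;> decide

theorem pyramid_roof_eq (height : Int) : pyramid_roof height = pyramid_roof_alt height := by
  unfold pyramid_roof pyramid_roof_alt
  have r5 : PySem.List.pyRange 0 5 1 = [0, 1, 2, 3, 4] := by decide
  rw [r5]
  simp only [List.map]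
  refine congrArg₂ _ (pv_layer_eq 0 height (by omega)) ?_
  refine congrArg₂ _ (pv_layer_eq 1 height (by omega)) ?_
  refine congrArg₂ _ (pv_layer_eq 2 height (by omega)) ?_
  refine congrArg₂ _ (pv_layer_eq 3 height (by omega)) ?_
  exact congrArg₂ _ (pv_layer_eq 4 height (by omega)) rfl

-- ===== VERDICT (by name: the statement is the Claim_ definition above) =====
theorem pyramid_roof_spec : Claim_equal_pyramid_roof := by
  intro height _
  unfold Spec_pyramid_roof
  exact pyramid_roof_eq height
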